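-- pv_equiv track=rewrite | github.com/lee14916/glwc3 | project/NST_f_groupProjection/Projectors-master_up1temp/Functions.py | split_gmatrix
-- ===== SOURCE A (Python) =====
-- def split_gmatrix(st):
--     assert(len(st)>0)
--     out = []
--     index0 = 0
--     index1 = 0
--     while (index1 < len(st)):
--         if st[index0]=='g':
--             index1 = index0+2
--         else:
--             index1 = index0+1
--         out.append(st[index0:index1])
--         index0 = index1
--     return out
-- ===== SOURCE B (Python) =====
-- import re
--
-- def split_gmatrix(st):
--     assert len(st) > 0
--     # Non-overlapping leftmost matches of 'g'+any-char, else any single char.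
--     # DOTALL so '.' also matches newline; a trailing lone 'g' matches via '.'.
--     return re.findall(r'g.|.', st, re.DOTALL)
-- ===== Notes on version B (the rewrite author's own statement) =====
-- stated objective: idiomatic
-- what changed: Replaces the manual two-index while loop with slicing by a single re.findall over the regex pattern g-dot-or-dot (with DOTALL), letting the regex engine's leftmost non-overlapping matching do the tokenization; no loop or index arithmetic remains.
import Mathlib
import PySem

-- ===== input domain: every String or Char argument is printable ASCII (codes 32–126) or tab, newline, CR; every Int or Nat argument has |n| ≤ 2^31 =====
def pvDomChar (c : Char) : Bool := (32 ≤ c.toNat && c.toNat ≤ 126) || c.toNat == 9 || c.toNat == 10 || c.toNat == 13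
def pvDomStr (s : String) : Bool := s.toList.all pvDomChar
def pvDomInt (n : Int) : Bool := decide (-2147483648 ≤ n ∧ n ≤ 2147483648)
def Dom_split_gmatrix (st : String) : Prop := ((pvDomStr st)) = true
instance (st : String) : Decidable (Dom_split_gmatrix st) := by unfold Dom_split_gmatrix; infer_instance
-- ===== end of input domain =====

-- B replaces A's two-index while loop with one re.findall over 'g.|.' (DOTALL);
-- idiomatic, same O(n) cost. Equivalence is about the return value only.

-- ===== PORT A =====
-- A's while loop: at the top of each iteration index0 = index1, so the loop condition
-- 'index1 < len(st)' is 'index0 < len(st)'; each branch sets index1, appends the slice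
-- st[index0:index1] and continues with index0 = index1.
def splitAGo (s : List Char) (index0 : Nat) : List String :=
  if h : index0 < s.length then
    if s[index0]! = 'g' then
      String.ofList (PySem.List.slice s (some (index0 : Int)) (some ((index0 : Int) + 2)))
        :: splitAGo s (index0 + 2)
    else
      String.ofList (PySem.List.slice s (some (index0 : Int)) (some ((index0 : Int) + 1)))
        :: splitAGo s (index0 + 1)
  else []
termination_by s.length - index0

def split_gmatrix (st : String) : List String := splitAGo st.toList 0

-- ===== PORT B =====
-- Hand-port of re.findall(r'g.|.', st, re.DOTALL): PySem has no regex, so the regex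
-- engine's leftmost non-overlapping matching of this pattern is transcribed exactly:
-- at each position the first alternative 'g.' (literal 'g' then any char, newline
-- included under DOTALL) is tried first; if it fails, '.' matches one char; the scan
-- resumes after the match. This is exact for this pattern (no backtracking across
-- matches occurs for 'g.|.').
def splitAltGo : List Char → List String
  | [] => []
  | 'g' :: d :: rest => String.ofList ['g', d] :: splitAltGo rest
  | c :: rest => String.ofList [c] :: splitAltGo rest

def split_gmatrix_alt (st : String) : List String := splitAltGo st.toList

-- ===== PRECONDITION & SPEC =====
-- Pre_ excludes only the empty string, on which A's assert raises AssertionError (B raises too).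
def Pre_split_gmatrix (st : String) : Prop := st ≠ ""
instance (st : String) : Decidable (Pre_split_gmatrix st) := by unfold Pre_split_gmatrix; infer_instance
def pvWitness_split_gmatrix : String := "gxg"

def Spec_split_gmatrix (st : String) (out : List String) : Prop := out = split_gmatrix_alt st
instance (st : String) (out : List String) : Decidable (Spec_split_gmatrix st out) := by unfold Spec_split_gmatrix; infer_instance

-- ===== CLAIM (what is proved, stated in full; the proofs are below) =====
def Claim_equal_split_gmatrix : Prop := ∀ (st : String), Dom_split_gmatrix st → Pre_split_gmatrix st → Spec_split_gmatrix st (split_gmatrix st)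

-- ===== LEMMAS AND PROOFS =====

theorem splitAltGo_ne {c : Char} (h : c ≠ 'g') (r : List Char) :
    splitAltGo (c :: r) = String.ofList [c] :: splitAltGo r := by
  cases r <;> simp [splitAltGo, h]

theorem splitAGo_eq_altGo_drop (s : List Char) (i : Nat) :
    splitAGo s i = splitAltGo (s.drop i) := by
  fun_induction splitAGo s i with
  | case1 i h hg ih =>
    have hd : s.drop i = s[i] :: s.drop (i + 1) := List.drop_eq_getElem_cons h
    have hget : s[i]! = s[i] := getElem!_pos s i h
    rw [hget] at hg
    rw [show ((i : Int) + 2) = ((i + 2 : Nat) : Int) by push_cast; ring,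
      PySem.List.slice_natCast, ih, hd]
    have h2 : i + 2 - i = 2 := by omega
    rw [h2]
    rcases h1 : s.drop (i + 1) with _ | ⟨d, r⟩
    · have : s.length = i + 1 := by
        have := List.drop_eq_nil_iff.mp h1; omega
      simp [hg, splitAltGo, List.drop_eq_nil_of_le (by omega : s.length ≤ i + 2)]
    · have : s.drop (i + 2) = r := by
        have : s.drop (i + 2) = (s.drop (i + 1)).drop 1 := by
          rw [List.drop_drop]
        simp [this, h1]
      simp [hg, splitAltGo, this]
  | case2 i h hg ih =>
    have hd : s.drop i = s[i] :: s.drop (i + 1) := List.drop_eq_getElem_cons h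
    have hget : s[i]! = s[i] := getElem!_pos s i h
    rw [hget] at hg
    rw [show ((i : Int) + 1) = ((i + 1 : Nat) : Int) by push_cast; ring,
      PySem.List.slice_natCast, ih, hd, splitAltGo_ne hg]
    have h1 : i + 1 - i = 1 := by omega
    rw [h1, List.take_succ_cons, List.take_zero]
  | case3 i h =>
    rw [List.drop_eq_nil_of_le (by omega), splitAltGo]

-- ===== VERDICT (by name: the statement is the Claim_ definition above) =====
theorem split_gmatrix_spec : Claim_equal_split_gmatrix := by
  intro st _ _
  unfold Spec_split_gmatrix split_gmatrix split_gmatrix_alt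
  simpa using splitAGo_eq_altGo_drop st.toList 0
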